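-- pv_equiv track=rewrite | github.com/burning-calamity/extirpation | online/route_cipher.py | route_encrypt
-- ===== SOURCE A (Python) =====
-- def route_encrypt(plaintext: str, width: int = 5) -> str:
--     if width < 2:
--         raise ValueError('width must be >= 2')
--     rows = (len(plaintext) + width - 1) // width
--     padded = plaintext.ljust(rows * width)
--     grid = [padded[i * width:(i + 1) * width] for i in range(rows)]
--     out = []
--     for r, row in enumerate(grid):
--         out.append(row[::-1] if r % 2 else row)
--     return ''.join(out)
-- ===== SOURCE B (Python) =====
-- def route_encrypt(plaintext: str, width: int = 5) -> str:
--     if width < 2: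
--         raise ValueError('width must be >= 2')
--     rows = (len(plaintext) + width - 1) // width
--     padded = plaintext.ljust(rows * width)
--     out = []
--     for p in range(rows * width):
--         row, col = divmod(p, width)
--         src = row * width + (col if row % 2 == 0 else width - 1 - col)
--         out.append(padded[src])
--     return ''.join(out)
-- ===== Notes on version B (the rewrite author's own statement) =====
-- stated objective: alternative
-- what changed: Replaces the grid of row slices with alternating slice reversal by a single flat pass over all cell positions, computing each output character's source index with row/col arithmetic (the boustrophedon direction comes from a per-character index formula, no grid list and no reversal).
import Mathlib
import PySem

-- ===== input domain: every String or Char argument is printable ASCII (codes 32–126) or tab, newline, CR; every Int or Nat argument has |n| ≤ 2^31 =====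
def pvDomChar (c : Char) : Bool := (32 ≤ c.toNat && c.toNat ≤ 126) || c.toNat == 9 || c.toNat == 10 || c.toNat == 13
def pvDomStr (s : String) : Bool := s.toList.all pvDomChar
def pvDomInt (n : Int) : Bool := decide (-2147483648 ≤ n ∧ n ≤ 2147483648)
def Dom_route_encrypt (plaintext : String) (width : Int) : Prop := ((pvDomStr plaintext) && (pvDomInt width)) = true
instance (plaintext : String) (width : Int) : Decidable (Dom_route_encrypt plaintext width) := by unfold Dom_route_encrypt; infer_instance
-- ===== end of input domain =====

-- B replaces the grid of row slices + alternating reversal by one flat pass computing each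
-- output character's source index arithmetically; same cost, different decomposition.

-- ===== PORT A =====
-- port of A; for width < 2 Python raises ValueError (excluded by Pre_), the port returns "".
-- plaintext.ljust(k) is ported as appending (k - len) pad spaces (Nat subtraction clamps at 0, as ljust does).
-- row[::-1] is List.reverse (PySem.List.slice?_none_none_neg_one).
def route_encrypt (plaintext : String) (width : Int) : String :=
  if width < 2 then "" else
  let cs := plaintext.toList
  let rows : Int := PySem.Int.floordiv ((cs.length : Int) + width - 1) width
  let padded := cs ++ List.replicate ((rows * width).toNat - cs.length) ' '
  let grid := (PySem.List.pyRange 0 rows 1).map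
      (fun i => PySem.List.slice padded (some (i * width)) (some ((i + 1) * width)))
  let out := (PySem.List.enumerate grid 0).foldl
      (fun acc rr => acc ++ (if PySem.Int.mod rr.1 2 ≠ 0 then rr.2.reverse else rr.2)) []
  String.ofList out

-- ===== PORT B =====
-- port of B (Source B); padded[src] is always in range, ported with pyGetD (default never used).
def route_encrypt_alt (plaintext : String) (width : Int) : String :=
  if width < 2 then "" else
  let cs := plaintext.toList
  let rows : Int := PySem.Int.floordiv ((cs.length : Int) + width - 1) width
  let padded := cs ++ List.replicate ((rows * width).toNat - cs.length) ' '
  let out := (PySem.List.pyRange 0 (rows * width) 1).map (fun p =>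
      let row := PySem.Int.floordiv p width
      let col := PySem.Int.mod p width
      let src := row * width + (if PySem.Int.mod row 2 = 0 then col else width - 1 - col)
      PySem.List.pyGetD padded src ' ')
  String.ofList out

-- ===== PRECONDITION & SPEC =====
-- Pre_ excludes exactly the inputs (width < 2) on which the Python A raises ValueError.
def Pre_route_encrypt (plaintext : String) (width : Int) : Prop := 2 ≤ width
instance (plaintext : String) (width : Int) : Decidable (Pre_route_encrypt plaintext width) := by unfold Pre_route_encrypt; infer_instance
def pvWitness_route_encrypt : String × Int := ("attackatdawn", 4)

def Spec_route_encrypt (plaintext : String) (width : Int) (out : String) : Prop := out = route_encrypt_alt plaintext width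
instance (plaintext : String) (width : Int) (out : String) : Decidable (Spec_route_encrypt plaintext width out) := by unfold Spec_route_encrypt; infer_instance

-- ===== CLAIM (what is proved, stated in full; the proofs are below) =====
def Claim_equal_route_encrypt : Prop := ∀ (plaintext : String) (width : Int), Dom_route_encrypt plaintext width → Pre_route_encrypt plaintext width → Spec_route_encrypt plaintext width (route_encrypt plaintext width)

-- ===== LEMMAS AND PROOFS =====

-- a forward chunk of L, read off character by character
lemma chunk_map (L : List Char) (a W : Nat) (h : a + W ≤ L.length) :
    (List.range W).map (fun c => L.getD (a + c) ' ') = (L.drop a).take W := by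
  apply List.ext_getElem
  · simp; omega
  · intro i h1 h2
    simp only [List.length_map, List.length_range] at h1
    simp only [List.getElem_map, List.getElem_range, List.getElem_take, List.getElem_drop]
    rw [List.getD_eq_getElem _ _ (by omega)]

-- a backward chunk of L is the reverse of the forward one
lemma chunk_rev_map (L : List Char) (a W : Nat) (h : a + W ≤ L.length) :
    (List.range W).map (fun c => L.getD (a + (W - 1 - c)) ' ') = ((L.drop a).take W).reverse := by
  apply List.ext_getElem
  · simp; omega
  · intro i h1 h2
    simp only [List.length_map, List.length_range] at h1
    rw [List.getElem_reverse]
    simp only [List.getElem_map, List.getElem_range, List.getElem_take, List.getElem_drop,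
      List.length_take, List.length_drop]
    rw [List.getD_eq_getElem _ _ (by omega)]
    congr 1
    omega

-- CORE: the rows of alternating chunks, concatenated, equal the flat index formula
lemma core (L : List Char) (W : Nat) (hW : 0 < W) :
    ∀ R : Nat, R * W ≤ L.length →
    (List.range R).flatMap (fun r => if r % 2 ≠ 0 then ((L.drop (r * W)).take W).reverse
                                     else (L.drop (r * W)).take W)
    = (List.range (R * W)).map (fun p =>
        L.getD (p / W * W + (if p / W % 2 = 0 then p % W else W - 1 - p % W)) ' ') := by
  intro R
  induction R with
  | zero => simp
  | succ R ih =>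
    intro h
    have hR : R * W ≤ L.length := by nlinarith
    rw [List.range_succ, List.flatMap_append, ih hR]
    have hsz : (R + 1) * W = R * W + W := by ring
    rw [hsz, List.range_add, List.map_append, List.map_map]
    congr 1
    have hdm : ∀ c : Nat, c < W → (R * W + c) / W = R ∧ (R * W + c) % W = c := by
      intro c hc
      constructor
      · rw [Nat.add_comm, Nat.add_mul_div_right _ _ hW, Nat.div_eq_of_lt hc]; omega
      · rw [Nat.add_comm, Nat.add_mul_mod_self_right, Nat.mod_eq_of_lt hc]
    have hlen : R * W + W ≤ L.length := by omega
    by_cases hpar : R % 2 = 0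
    · simp only [hpar, List.flatMap_cons, List.flatMap_nil, List.append_nil, ne_eq,
        not_true_eq_false, if_false]
      rw [← chunk_map L (R * W) W hlen]
      apply List.map_congr_left
      intro c hc
      simp only [List.mem_range] at hc
      simp [Function.comp_apply, (hdm c hc).1, (hdm c hc).2, hpar]
    · simp only [List.flatMap_cons, List.flatMap_nil, List.append_nil, ne_eq, hpar,
        not_false_eq_true, if_true]
      rw [← chunk_rev_map L (R * W) W hlen]
      apply List.map_congr_left
      intro c hc
      simp only [List.mem_range] at hc
      simp only [Function.comp_apply, (hdm c hc).1, (hdm c hc).2, if_neg hpar]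

-- pointwise-equal row functions give the same concatenation
lemma flatMap_congr_mem {α β : Type} (l : List α) (f g : α → List β) (h : ∀ a ∈ l, f a = g a) :
    l.flatMap f = l.flatMap g := by
  simp only [List.flatMap_def]
  rw [List.map_congr_left h]

-- A's enumerate-fold over the grid is the flatMap of the alternating rows
lemma enum_fold (f : Nat → List Char) :
    ∀ R : Nat,
    (PySem.List.enumerate ((List.range R).map f) 0).foldl
      (fun acc rr => acc ++ (if PySem.Int.mod rr.1 2 ≠ 0 then rr.2.reverse else rr.2)) []
    = (List.range R).flatMap (fun r => if r % 2 ≠ 0 then (f r).reverse else f r) := by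
  intro R
  induction R with
  | zero => simp [PySem.List.enumerate_nil]
  | succ R ih =>
    rw [List.range_succ, List.map_append, PySem.List.enumerate_append, List.foldl_append, ih,
        List.flatMap_append]
    simp only [List.map_cons, List.map_nil, PySem.List.enumerate_cons, PySem.List.enumerate_nil,
      List.foldl_cons, List.foldl_nil, List.length_map, List.length_range,
      List.flatMap_cons, List.flatMap_nil, List.append_nil]
    have hm : PySem.Int.mod (0 + (R : Int)) 2 = ((R % 2 : Nat) : Int) := by
      rw [zero_add]; exact_mod_cast PySem.Int.mod_natCast R 2
    rw [hm]
    by_cases hp : R % 2 = 0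
    · have h0 : ((R % 2 : Nat) : Int) = 0 := by exact_mod_cast hp
      rw [if_neg (by simpa using h0), if_neg (by simpa using hp)]
    · have h0 : ((R % 2 : Nat) : Int) ≠ 0 := by exact_mod_cast hp
      rw [if_pos h0, if_pos hp]

-- ===== VERDICT (by name: the statement is the Claim_ definition above) =====
theorem route_encrypt_spec : Claim_equal_route_encrypt := by
  intro plaintext width _ hpre
  unfold Pre_route_encrypt at hpre
  unfold Spec_route_encrypt route_encrypt route_encrypt_alt
  have hw2 : ¬ width < 2 := by omega
  rw [if_neg hw2, if_neg hw2]
  dsimp only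
  set cs := plaintext.toList with hcs
  set n : Nat := cs.length with hn
  have hwpos : (0:Int) < width := by omega
  -- width and rows as naturals
  obtain ⟨W, hW⟩ : ∃ W : Nat, width = (W : Nat) := ⟨width.toNat, by omega⟩
  have hWpos : 0 < W := by omega
  set rows : Int := PySem.Int.floordiv ((n : Int) + width - 1) width with hrows
  have hrows_nonneg : 0 ≤ rows := by
    rw [hrows, PySem.Int.floordiv_eq_ediv_of_pos hwpos]
    exact Int.ediv_nonneg (by omega) (by omega)
  obtain ⟨R, hR⟩ : ∃ R : Nat, rows = (R : Nat) := ⟨rows.toNat, by omega⟩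
  have hceil : (n : Int) ≤ rows * width := by
    have := PySem.Int.floordiv_eq_iff_of_pos (a := (n : Int) + width - 1) (b := width)
      (q := rows) hwpos
    have h2 := (this.mp hrows.symm).2
    nlinarith
  have hRW : n ≤ R * W := by
    have : ((n : Int)) ≤ ((R * W : Nat) : Int) := by rw [hR, hW] at hceil; push_cast at hceil ⊢; linarith
    exact_mod_cast this
  have hprod : rows * width = ((R * W : Nat) : Int) := by rw [hR, hW]; push_cast; ring
  set padded : List Char := cs ++ List.replicate ((rows * width).toNat - n) ' ' with hpad
  have hplen : padded.length = R * W := by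
    rw [hpad]; simp only [List.length_append, List.length_replicate]
    rw [hprod]; simp only [Int.toNat_natCast]; omega
  congr 1
  -- rewrite A's side
  rw [hR, PySem.List.pyRange_one, List.map_map]
  simp only [sub_zero, Int.toNat_natCast]
  have hgrid : ∀ r : Nat, PySem.List.slice padded (some ((r : Int) * width)) (some (((r : Int) + 1) * width))
      = (padded.drop (r * W)).take W := by
    intro r
    have e1 : ((r : Int) * width) = ((r * W : Nat) : Int) := by rw [hW]; push_cast; ring
    have e2 : (((r : Int) + 1) * width) = ((r * W + W : Nat) : Int) := by rw [hW]; push_cast; ring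
    rw [e1, e2, PySem.List.slice_natCast]
    congr 1
    omega
  rw [enum_fold]
  trans ((List.range R).flatMap (fun r => if r % 2 ≠ 0 then ((padded.drop (r * W)).take W).reverse
      else (padded.drop (r * W)).take W))
  · apply flatMap_congr_mem
    intro r _
    simp only [Function.comp_apply, zero_add, hgrid r]
  rw [core padded W hWpos R (by omega)]
  -- rewrite B's side
  have hprod' : ((R : Nat) : Int) * width = ((R * W : Nat) : Int) := by rw [hW]; push_cast; ring
  rw [hprod', PySem.List.pyRange_one, List.map_map]
  simp only [sub_zero, Int.toNat_natCast]
  apply List.map_congr_left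
  intro p hp
  simp only [List.mem_range] at hp
  simp only [Function.comp_apply, zero_add]
  have hdiv : PySem.Int.floordiv (p : Int) width = ((p / W : Nat) : Int) := by
    rw [hW]; exact_mod_cast PySem.Int.floordiv_natCast p W
  have hmod : PySem.Int.mod (p : Int) width = ((p % W : Nat) : Int) := by
    rw [hW]; exact_mod_cast PySem.Int.mod_natCast p W
  have hmod2 : PySem.Int.mod ((p / W : Nat) : Int) 2 = ((p / W % 2 : Nat) : Int) := by
    exact_mod_cast PySem.Int.mod_natCast (p / W) 2
  rw [hdiv, hmod, hmod2]
  have hsrc : (((p / W : Nat) : Int) * width +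
      (if ((p / W % 2 : Nat) : Int) = 0 then ((p % W : Nat) : Int) else width - 1 - ((p % W : Nat) : Int)))
      = ((p / W * W + (if p / W % 2 = 0 then p % W else W - 1 - p % W) : Nat) : Int) := by
    have hmlt : p % W < W := Nat.mod_lt _ hWpos
    by_cases hpar : p / W % 2 = 0
    · rw [if_pos (by exact_mod_cast hpar), if_pos hpar, hW]; push_cast; ring
    · rw [if_neg (by exact_mod_cast hpar), if_neg hpar, hW]; push_cast [Nat.sub_sub]; omega
  rw [hsrc, PySem.List.pyGetD_natCast]
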